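-- pv_equiv track=rewrite | github.com/Wellan76/code-de-vigen-re | Projet_info_n1.py | IC9
-- ===== SOURCE A (Python) =====
-- def IC9(a:int):
--     str = ""
--     sous_chaine = []
--     for j in range(0,9):
--         for i in range(j,len(a),9):
--             str = str + a[i]
--         sous_chaine.append(str)
--         str = ""
--     return sous_chaine
-- ===== SOURCE B (Python) =====
-- def IC9(a):
--     sous_chaine = ['' for _ in range(9)]
--     for i in range(len(a)):
--         sous_chaine[i % 9] += a[i]
--     return sous_chaine
-- ===== Notes on version B (the rewrite author's own statement) =====
-- stated objective: simpler
-- what changed: Replaces A's nested per-residue gathering scan (9 passes over the string with step-9 index arithmetic) by a single flat pass that distributes each character into bucket i % 9.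
import Mathlib
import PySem

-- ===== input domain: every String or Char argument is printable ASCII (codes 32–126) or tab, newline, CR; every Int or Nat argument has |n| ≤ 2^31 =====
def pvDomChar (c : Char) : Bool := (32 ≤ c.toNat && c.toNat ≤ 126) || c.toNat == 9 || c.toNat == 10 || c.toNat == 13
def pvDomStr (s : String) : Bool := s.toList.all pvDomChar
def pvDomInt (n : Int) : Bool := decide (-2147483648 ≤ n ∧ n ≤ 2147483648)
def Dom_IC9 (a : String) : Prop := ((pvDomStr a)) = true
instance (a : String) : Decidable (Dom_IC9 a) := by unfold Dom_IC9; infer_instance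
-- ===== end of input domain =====

-- B replaces A's nested per-residue gathering scan by a single flat pass bucketing each character at index i % 9 (simpler; same cost).


-- ===== PORT A =====
-- A: for j in range(0,9): gather a[j], a[j+9], … into one string, append it.
-- Python strings are built as List Char and wrapped with String.ofList (Lean's own String ops are kernel-opaque).
def IC9 (a : String) : List String :=
  let l := a.toList
  (PySem.List.pyRange 0 9 1).foldl
    (fun sous j =>
      sous ++ [String.ofList ((PySem.List.pyRange j (PySem.List.len l) 9).foldl
        (fun s i => s ++ [PySem.List.pyGetD l i ' ']) [])])
    []

-- ===== PORT B =====
-- B: nine empty buckets; one flat pass; character i goes to bucket i % 9.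
def IC9_alt (a : String) : List String :=
  let l := a.toList
  let buckets : List (List Char) :=
    (PySem.List.pyRange 0 (PySem.List.len l) 1).foldl
      (fun bs i =>
        PySem.List.pySetD bs (PySem.Int.mod i 9)
          (PySem.List.pyGetD bs (PySem.Int.mod i 9) [] ++ [PySem.List.pyGetD l i ' ']))
      (List.replicate 9 [])
  buckets.map String.ofList

-- ===== PRECONDITION & SPEC =====
def Spec_IC9 (a : String) (out : List String) : Prop := out = IC9_alt a
instance (a : String) (out : List String) : Decidable (Spec_IC9 a out) := by unfold Spec_IC9; infer_instance

-- ===== CLAIM (what is proved, stated in full; the proofs are below) =====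
def Claim_equal_IC9 : Prop := ∀ (a : String), Dom_IC9 a → Spec_IC9 a (IC9 a)

-- ===== LEMMAS AND PROOFS =====

-- the characters of l at indices ≡ 0 (mod 9)
def takeEvery9 : List Char → List Char
  | [] => []
  | c :: t => c :: takeEvery9 (t.drop 8)
termination_by l => l.length
decreasing_by simp [List.length_drop]

theorem takeEvery9_nil : takeEvery9 [] = [] := by simp [takeEvery9]

theorem takeEvery9_append (xs : List Char) (c : Char) :
    takeEvery9 (xs ++ [c]) = takeEvery9 xs ++ (if xs.length % 9 = 0 then [c] else []) := by
  induction hn : xs.length using Nat.strong_induction_on generalizing xs with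
  | _ n ih =>
    cases xs with
    | nil =>
      simp only [List.length_nil] at hn
      subst hn
      simp [takeEvery9, takeEvery9_nil]
    | cons x t =>
      simp only [List.length_cons] at hn
      by_cases h : 8 ≤ t.length
      · rw [List.cons_append, takeEvery9, takeEvery9, List.drop_append_of_le_length h,
            ih (t.drop 8).length (by simp; omega) (t.drop 8) rfl]
        simp only [List.length_drop]
        rw [if_congr (show (t.length - 8) % 9 = 0 ↔ n % 9 = 0 by omega) rfl rfl]
        simp
      · have hd : (t ++ [c]).drop 8 = [] := List.drop_eq_nil_of_le (by simp; omega)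
        have hd' : t.drop 8 = [] := List.drop_eq_nil_of_le (by omega)
        have hne : ¬ n % 9 = 0 := by omega
        rw [List.cons_append, takeEvery9, takeEvery9, hd, hd']
        simp [takeEvery9_nil, hne]

theorem takeEvery9_drop_step (l : List Char) (j : Nat) (h : j < l.length) :
    takeEvery9 (l.drop j) = l.getD j ' ' :: takeEvery9 (l.drop (j + 9)) := by
  rw [List.drop_eq_getElem_cons h, takeEvery9, List.drop_drop, List.getD_eq_getElem l ' ' h]

theorem pyRange9_nil (a b : Int) (h : b ≤ a) : PySem.List.pyRange a b 9 = [] := by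
  rw [PySem.List.pyRange_of_pos a b (by norm_num)]
  simp [not_lt.mpr h]

theorem pyRange9_cons (a b : Int) (h : a < b) :
    PySem.List.pyRange a b 9 = a :: PySem.List.pyRange (a + 9) b 9 := by
  rw [PySem.List.pyRange_of_pos a b (by norm_num),
      PySem.List.pyRange_of_pos (a + 9) b (by norm_num)]
  simp only [if_pos h]
  by_cases h2 : a + 9 < b
  · have hn : ((b - a + 9 - 1) / 9).toNat = ((b - (a + 9) + 9 - 1) / 9).toNat + 1 := by omega
    rw [hn, if_pos h2, List.range_succ_eq_map, List.map_cons, List.map_map]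
    refine congrArg₂ _ (by norm_num) (List.map_congr_left fun k _ => ?_)
    simp [Function.comp, Nat.succ_eq_add_one]
    ring
  · have hn : ((b - a + 9 - 1) / 9).toNat = 1 := by omega
    rw [hn, if_neg h2]
    simp

-- A's inner loop gathers exactly the residue-class-j characters
theorem foldA (l : List Char) (fuel : Nat) :
    ∀ (j : Nat), l.length - j ≤ fuel → ∀ (acc : List Char),
    (PySem.List.pyRange (j : Int) (PySem.List.len l) 9).foldl
      (fun s i => s ++ [PySem.List.pyGetD l i ' ']) acc
    = acc ++ takeEvery9 (l.drop j) := by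
  induction fuel with
  | zero =>
    intro j h acc
    have hj : l.length ≤ j := by omega
    rw [pyRange9_nil _ _ (by simp [PySem.List.len_eq]; exact_mod_cast hj),
        List.drop_eq_nil_of_le hj, takeEvery9_nil]
    simp
  | succ fuel ih =>
    intro j h acc
    by_cases hj : j < l.length
    · rw [pyRange9_cons _ _ (by simp [PySem.List.len_eq]; exact_mod_cast hj)]
      simp only [List.foldl_cons, PySem.List.pyGetD_natCast]
      have hc : ((j : Int) + 9) = ((j + 9 : Nat) : Int) := by push_cast; ring
      rw [hc, ih (j + 9) (by omega) (acc ++ [l.getD j ' '])]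
      rw [takeEvery9_drop_step l j hj]
      simp
    · have hj' : l.length ≤ j := by omega
      rw [pyRange9_nil _ _ (by simp [PySem.List.len_eq]; exact_mod_cast hj'),
          List.drop_eq_nil_of_le hj', takeEvery9_nil]
      simp

-- the single update B performs on arrival of the character at index l.length
theorem set_bucket (l : List Char) (c : Char) :
    ((List.range 9).map (fun j => takeEvery9 (l.drop j))).set (l.length % 9)
      (takeEvery9 (l.drop (l.length % 9)) ++ [c])
    = (List.range 9).map (fun j => takeEvery9 ((l ++ [c]).drop j)) := by
  apply List.ext_getElem
  · simp
  intro j h1 h2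
  simp only [List.length_set, List.length_map, List.length_range] at h1
  rw [List.getElem_set, List.getElem_map, List.getElem_map, List.getElem_range]
  by_cases hj : j ≤ l.length
  · rw [List.drop_append_of_le_length hj, takeEvery9_append]
    have hlen : (l.drop j).length = l.length - j := by simp
    by_cases he : l.length % 9 = j
    · rw [if_pos he, he]
      have : (l.drop j).length % 9 = 0 := by rw [hlen]; omega
      rw [if_pos this]
    · rw [if_neg he]
      have : ¬ (l.drop j).length % 9 = 0 := by rw [hlen]; omega
      rw [if_neg this, List.append_nil]
  · have hj1 : (l ++ [c]).drop j = [] := List.drop_eq_nil_of_le (by simp; omega)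
    have hj2 : l.drop j = [] := List.drop_eq_nil_of_le (by omega)
    have he : ¬ l.length % 9 = j := by omega
    rw [if_neg he, hj1, hj2]

-- total form of list[i] = v for an in-range natural index
theorem pySetD_natCast (bs : List (List Char)) (n : Nat) (v : List Char) (h : n < bs.length) :
    PySem.List.pySetD bs (n : Int) v = bs.set n v := by
  simp [PySem.List.pySetD, PySem.List.pySet?, PySem.List.pyIdx?, h]

-- B's flat pass maintains: bucket j = residue-class-j characters of the prefix read so far
theorem foldB (l : List Char) :
    (PySem.List.pyRange 0 ((l.length : Nat) : Int) 1).foldl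
      (fun bs i =>
        PySem.List.pySetD bs (PySem.Int.mod i 9)
          (PySem.List.pyGetD bs (PySem.Int.mod i 9) [] ++ [PySem.List.pyGetD l i ' ']))
      (List.replicate 9 [])
    = (List.range 9).map (fun j => takeEvery9 (l.drop j)) := by
  induction l using List.reverseRecOn with
  | nil =>
    simp [List.drop_nil, takeEvery9_nil, List.map_const']
  | append_singleton l c ih =>
    have hstep : (((l ++ [c]).length : Nat) : Int) = ((l.length : Nat) : Int) + 1 := by
      simp
    rw [hstep, PySem.List.pyRange_one_succ_right (by omega), List.foldl_append]
    simp only [List.foldl_cons, List.foldl_nil]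
    rw [PySem.List.foldl_congr_mem _ _
      (fun bs i =>
        PySem.List.pySetD bs (PySem.Int.mod i 9)
          (PySem.List.pyGetD bs (PySem.Int.mod i 9) [] ++ [PySem.List.pyGetD l i ' '])) _
      (by
        intro acc x hx
        rw [PySem.List.mem_pyRange_one] at hx
        have hxl : x.toNat < l.length := by omega
        beta_reduce
        congr 3
        rw [PySem.List.pyGetD_eq_getElem (l ++ [c]) ' ' hx.1 (by simp; omega),
            PySem.List.pyGetD_eq_getElem l ' ' hx.1 (by omega)]
        exact List.getElem_append_left (by omega))]
    rw [ih]
    have hmod : PySem.Int.mod ((l.length : Nat) : Int) 9 = ((l.length % 9 : Nat) : Int) := by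
      exact_mod_cast PySem.Int.mod_natCast l.length 9
    have hM : ((List.range 9).map (fun j => takeEvery9 (l.drop j))).length = 9 := by simp
    have hget :
        PySem.List.pyGetD ((List.range 9).map (fun j => takeEvery9 (l.drop j)))
          ((l.length % 9 : Nat) : Int) []
        = takeEvery9 (l.drop (l.length % 9)) := by
      rw [PySem.List.pyGetD_natCast, List.getD_eq_getElem _ _ (by rw [hM]; omega),
          List.getElem_map, List.getElem_range]
    have hgetc : PySem.List.pyGetD (l ++ [c]) ((l.length : Nat) : Int) ' ' = c := by
      rw [PySem.List.pyGetD_natCast, List.getD_eq_getElem _ _ (by simp),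
          List.getElem_concat_length rfl]
    rw [hmod, hget, hgetc, pySetD_natCast _ _ _ (by rw [hM]; omega)]
    exact set_bucket l c

theorem IC9_eq (a : String) :
    IC9 a = (List.range 9).map (fun j => String.ofList (takeEvery9 (a.toList.drop j))) := by
  simp only [IC9]
  rw [PySem.List.foldl_append_singleton_eq_map
    (fun j => String.ofList ((PySem.List.pyRange j (PySem.List.len a.toList) 9).foldl
      (fun s i => s ++ [PySem.List.pyGetD a.toList i ' ']) []))]
  rw [PySem.List.pyRange_one, List.map_map, List.nil_append,
      show ((9 : Int) - 0).toNat = 9 by decide]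
  apply List.map_congr_left
  intro k hk
  simp only [Function.comp_apply, zero_add]
  rw [foldA a.toList a.toList.length k (by omega) []]
  simp

theorem IC9_alt_eq (a : String) :
    IC9_alt a = (List.range 9).map (fun j => String.ofList (takeEvery9 (a.toList.drop j))) := by
  simp only [IC9_alt]
  rw [show PySem.List.len a.toList = ((a.toList.length : Nat) : Int) from by
        simp [PySem.List.len_eq],
      foldB a.toList, List.map_map]
  rfl

-- ===== VERDICT (by name: the statement is the Claim_ definition above) =====
theorem IC9_spec : Claim_equal_IC9 := by
  intro a _
  unfold Spec_IC9
  rw [IC9_eq, IC9_alt_eq]
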